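-- pv_equiv track=rewrite | github.com/LeeKangHoo/Swea | diff_3/1289_원재의메모리복구하기/1289_원재의메모리복구하기.py | solve
-- ===== SOURCE A (Python) =====
-- def solve(num):
--     cur = ['0'] * len(num)
--     cnt = 0
--     while cur != num:
--         for i in range(len(num)):
--             if cur[i] != num[i]:
--                 v1 = num[i]
--                 for j in range(i,len(cur)):
--                     cur[j] = v1
--                 cnt += 1
--     return cnt
-- ===== SOURCE B (Python) =====
-- def solve(num):
--     cnt = 0
--     prev = '0'
--     for x in num:
--         if x != prev:
--             cnt += 1
--         prev = x
--     return cnt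
-- ===== Notes on version B (the rewrite author's own statement) =====
-- stated objective: faster
-- what changed: Replaces the simulate-the-flips loop (repeated suffix rewrites plus whole-list comparisons) by a single pass that counts transitions between consecutive elements starting from '0'.
import Mathlib
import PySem

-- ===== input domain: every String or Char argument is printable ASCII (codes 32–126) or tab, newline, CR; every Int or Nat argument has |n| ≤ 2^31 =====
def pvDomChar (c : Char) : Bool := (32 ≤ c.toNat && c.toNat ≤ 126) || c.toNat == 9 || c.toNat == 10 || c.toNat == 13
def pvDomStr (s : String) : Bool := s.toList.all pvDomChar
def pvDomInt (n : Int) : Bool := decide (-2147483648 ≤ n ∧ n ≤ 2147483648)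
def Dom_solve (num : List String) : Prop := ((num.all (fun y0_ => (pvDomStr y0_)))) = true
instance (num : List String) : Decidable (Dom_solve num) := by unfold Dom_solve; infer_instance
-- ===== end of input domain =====

-- B replaces A's simulation of suffix flips by a single pass counting transitions
-- between consecutive elements (objective: faster; a timing run measures the speed-up).

-- ===== PORT A =====
-- inner loop 'for j in range(i, len(cur)): cur[j] = v1'
def setFrom (cur : List String) (v : String) (i : Nat) : List String :=
  (List.range' i (cur.length - i)).foldl (fun c j => c.set j v) cur

-- one run of 'for i in range(len(num)): if cur[i] != num[i]: …' over the state (cur, cnt)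
-- (index accesses are in range in every reachable call since cur always has num's length;
--  getD "" is only the totality default)
def passFor (num : List String) (s : List String × Int) : List String × Int :=
  (List.range' 0 num.length).foldl
    (fun s i =>
      if s.1.getD i "" ≠ num.getD i "" then (setFrom s.1 (num.getD i "") i, s.2 + 1) else s)
    s

theorem setFrom_length (cur : List String) (v : String) (i : Nat) :
    (setFrom cur v i).length = cur.length := by
  unfold setFrom
  generalize List.range' i (cur.length - i) = l
  induction l generalizing cur with
  | nil => rfl
  | cons a l ih => simp only [List.foldl_cons]; rw [ih]; simp

theorem setFrom_go (v : String) (n : Nat) :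
    ∀ (i : Nat) (cur : List String), i + n ≤ cur.length →
      (List.range' i n).foldl (fun c j => c.set j v) cur
        = cur.take i ++ List.replicate n v ++ cur.drop (i + n) := by
  induction n with
  | zero => intro i cur _; simp
  | succ n ih =>
    intro i cur h
    have hi : i < cur.length := by omega
    rw [List.range'_succ, List.foldl_cons, ih (i + 1) (cur.set i v) (by simp; omega)]
    have h1 : (cur.set i v).take (i + 1) = cur.take i ++ [v] := by
      rw [List.set_eq_take_cons_drop v hi, List.take_append]
      simp [Nat.min_eq_left hi.le, List.take_take]
    have hdrop : (cur.set i v).drop (i + 1 + n) = cur.drop (i + 1 + n) := by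
      apply List.drop_set_of_lt
      omega
    rw [h1, hdrop]
    have h2 : i + 1 + n = i + (n + 1) := by omega
    simp [h2, List.replicate_succ]

theorem setFrom_eq (cur : List String) (v : String) (i : Nat) :
    setFrom cur v i = cur.take i ++ List.replicate (cur.length - i) v := by
  unfold setFrom
  by_cases h : i ≤ cur.length
  · rw [setFrom_go v (cur.length - i) i cur (by omega),
      List.drop_of_length_le (by omega)]
    simp
  · have h0 : cur.length - i = 0 := by omega
    have ht : cur.take i = cur := List.take_of_length_le (by omega)
    rw [h0]
    simp [ht]

-- general form of the fold behind passFor, first component: the pass always ends with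
-- cur = num (needed below for the while-loop's termination)
theorem passFor_go_fst (num : List String) (n : Nat) :
    ∀ (i : Nat) (cur : List String) (cnt : Int), cur.length = num.length →
      i + n = num.length →
      ((List.range' i n).foldl
        (fun s j =>
          if s.1.getD j "" ≠ num.getD j "" then (setFrom s.1 (num.getD j "") j, s.2 + 1) else s)
        (cur, cnt)).1 = cur.take i ++ num.drop i := by
  induction n with
  | zero =>
    intro i cur cnt hlen hin
    simp only [List.range'_zero, List.foldl_nil]
    have ht : cur.take i = cur := List.take_of_length_le (by omega)
    have hd : num.drop i = [] := List.drop_of_length_le (by omega)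
    rw [ht, hd, List.append_nil]
  | succ n ih =>
    intro i cur cnt hlen hin
    have h : i < num.length := by omega
    have hi : i < cur.length := by omega
    rw [List.range'_succ, List.foldl_cons]
    by_cases hne : cur.getD i "" ≠ num.getD i ""
    · rw [if_pos hne]
      rw [ih (i + 1) _ _ (by rw [setFrom_length]; exact hlen) (by omega), setFrom_eq]
      rw [List.take_append, List.take_take, Nat.min_eq_right (Nat.le_succ i),
        List.length_take, Nat.min_eq_left hi.le]
      have h1 : i + 1 - i = 1 := by omega
      have hmin1 : min 1 (cur.length - i) = 1 := Nat.min_eq_left (by omega)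
      rw [h1, List.take_replicate, hmin1, List.append_assoc]
      congr 1
      rw [List.drop_eq_getElem_cons h, List.getD_eq_getElem _ _ h]
      rfl
    · rw [if_neg hne]
      rw [not_not] at hne
      rw [ih (i + 1) _ _ hlen (by omega)]
      rw [List.take_add_one, List.getElem?_eq_getElem hi]
      simp only [Option.toList_some, List.append_assoc]
      congr 1
      rw [List.drop_eq_getElem_cons h, List.singleton_append]
      congr 1
      rw [← List.getD_eq_getElem _ "" hi, ← List.getD_eq_getElem _ "" h]
      exact hne

theorem passFor_fst (num cur : List String) (cnt : Int) (hlen : cur.length = num.length) :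
    (passFor num (cur, cnt)).1 = num := by
  unfold passFor
  rw [passFor_go_fst num num.length 0 cur cnt hlen (by omega)]
  simp

-- 'while cur != num': run one pass over the indices, repeat
def solveWhile (cur num : List String) (cnt : Int) (hlen : cur.length = num.length) : Int :=
  if cur = num then cnt
  else
    let p := passFor num (cur, cnt)
    solveWhile p.1 num p.2 (by rw [passFor_fst num cur cnt hlen])
termination_by (if cur = num then 0 else 1 : Nat)
decreasing_by
  have h1 : (passFor num (cur, cnt)).1 = num := passFor_fst num cur cnt hlen
  simp_all

def solve (num : List String) : Int :=
  solveWhile (List.replicate num.length "0") num 0 (by simp)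

-- ===== PORT B =====
def solve_alt (num : List String) : Int :=
  (num.foldl (fun (s : Int × String) x => (if x ≠ s.2 then s.1 + 1 else s.1, x)) (0, "0")).1

-- ===== PRECONDITION & SPEC =====
def Spec_solve (num : List String) (out : Int) : Prop := out = solve_alt num
instance (num : List String) (out : Int) : Decidable (Spec_solve num out) := by unfold Spec_solve; infer_instance

-- ===== CLAIM (what is proved, stated in full; the proofs are below) =====
def Claim_equal_solve : Prop := ∀ (num : List String), Dom_solve num → Spec_solve num (solve num)

-- ===== LEMMAS AND PROOFS =====

-- number of transitions in num, starting from previous value v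
def transFrom (v : String) : List String → Int
  | [] => 0
  | x :: xs => (if x ≠ v then 1 else 0) + transFrom x xs

theorem solve_alt_foldl (xs : List String) (c : Int) (p : String) :
    (xs.foldl (fun (s : Int × String) x => (if x ≠ s.2 then s.1 + 1 else s.1, x)) (c, p)).1
      = c + transFrom p xs := by
  induction xs generalizing c p with
  | nil => simp [transFrom]
  | cons x xs ih =>
    simp only [List.foldl_cons, transFrom]
    rw [ih]
    split_ifs <;> ring

theorem solve_alt_eq (num : List String) : solve_alt num = transFrom "0" num := by
  unfold solve_alt
  rw [solve_alt_foldl]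
  ring

theorem passFor_go_snd (num : List String) (n : Nat) :
    ∀ (i : Nat) (cur : List String) (cnt : Int) (v : String), cur.length = num.length →
      i + n = num.length →
      (∀ j, i ≤ j → j < cur.length → cur.getD j "" = v) →
      ((List.range' i n).foldl
        (fun s j =>
          if s.1.getD j "" ≠ num.getD j "" then (setFrom s.1 (num.getD j "") j, s.2 + 1) else s)
        (cur, cnt)).2 = cnt + transFrom v (num.drop i) := by
  induction n with
  | zero =>
    intro i cur cnt v hlen hin hsuf
    have hd : num.drop i = [] := List.drop_of_length_le (by omega)
    rw [hd]
    simp [transFrom]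
  | succ n ih =>
    intro i cur cnt v hlen hin hsuf
    have h : i < num.length := by omega
    have hi : i < cur.length := by omega
    have hcuri : cur.getD i "" = v := hsuf i (le_refl i) hi
    have hg : num.getD i "" = num[i] := List.getD_eq_getElem _ _ h
    rw [List.range'_succ, List.foldl_cons]
    by_cases hne : cur.getD i "" ≠ num.getD i ""
    · rw [if_pos hne]
      rw [ih (i + 1) _ _ (num.getD i "") (by rw [setFrom_length]; exact hlen) (by omega) ?_]
      · rw [List.drop_eq_getElem_cons h, transFrom]
        rw [hcuri] at hne
        rw [if_pos (by rw [← hg]; exact fun hh => hne hh.symm), hg]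
        ring
      · intro j hj hjl
        rw [setFrom_eq] at hjl ⊢
        rw [List.getD_eq_getElem _ _ hjl,
          List.getElem_append_right (by simp [Nat.min_eq_left hi.le]; omega)]
        simp
    · rw [if_neg hne]
      rw [not_not] at hne
      rw [ih (i + 1) _ _ (num.getD i "") hlen (by omega)
        (fun j hj hjl => by rw [hsuf j (by omega) hjl, ← hcuri, hne])]
      rw [List.drop_eq_getElem_cons h, transFrom]
      rw [if_neg (by rw [← hg, ← hne, hcuri]; simp), hg]
      ring

theorem passFor_snd (num cur : List String) (cnt : Int) (v : String)
    (hlen : cur.length = num.length)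
    (hsuf : ∀ j, j < cur.length → cur.getD j "" = v) :
    (passFor num (cur, cnt)).2 = cnt + transFrom v num := by
  unfold passFor
  rw [passFor_go_snd num num.length 0 cur cnt v hlen (by omega)
    (fun j _ hj => hsuf j hj)]
  rfl

theorem transFrom_replicate (n : Nat) : transFrom "0" (List.replicate n "0") = 0 := by
  induction n with
  | zero => rfl
  | succ n ih => simp [List.replicate_succ, transFrom, ih]

theorem solveWhile_done (cur num : List String) (cnt : Int) (hlen : cur.length = num.length)
    (h : cur = num) : solveWhile cur num cnt hlen = cnt := by
  rw [solveWhile, if_pos h]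

theorem solve_eq (num : List String) : solve num = transFrom "0" num := by
  unfold solve
  rw [solveWhile]
  split_ifs with h
  · rw [← h, transFrom_replicate]
  · have hlen : (List.replicate num.length "0").length = num.length := by simp
    have h2 : (passFor num (List.replicate num.length "0", 0)).2 = transFrom "0" num := by
      rw [passFor_snd num _ 0 "0" hlen (fun j hj => by
        rw [List.getD_eq_getElem _ _ hj]; simp)]
      simp
    rw [solveWhile_done _ _ _ _ (passFor_fst num _ 0 hlen), h2]

-- ===== VERDICT (by name: the statement is the Claim_ definition above) =====
theorem solve_spec : Claim_equal_solve := by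
  intro num _
  unfold Spec_solve
  rw [solve_eq, solve_alt_eq]
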